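-- pv_equiv track=rewrite | github.com/BiggestChris/CS50P-Final-Project-V1 | match2_functions.py | grid_to_hash_table
-- ===== SOURCE A (Python) =====
-- def grid_to_hash_table(object, size):
--     table = [[""]]                                      # Creates an empty table to populate, first column/first row is blank
--     for num in range(97, (size[0] + 97)):                   # Populates first row with column letters
--         table[0].append(chr(num))
--     for num in range(1, (size[1] + 1)):                     # For each row, populates first entry with row number
--         try:
--             if object[f"a{num}"]:                           # If there's another row then creates that row
--                 table.append([f"{num}"])
--                 table = recur_hash(table, object, 97, num)      # Looks to populate with as many columns that exists, then the loop moves to the next row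
--         except KeyError:
--             pass
--
--     return table
--
-- def recur_hash(table, object, x, y):
--     table_change = table
--     try:
--         if object[f"{chr(x)}{y}"]:                          # Uses recursion to look to see if another column is there and populating with a hash if so
--             table_change[y].append("#")
--             return recur_hash(table, object, (x + 1), (y))
--     except KeyError:
--         return table_change
-- ===== SOURCE B (Python) =====
-- def grid_to_hash_table(object, size):
--     header = [""] + [chr(c) for c in range(97, 97 + size[0])]
--     rows = []
--     num = 1
--     while num <= size[1]:
--         if not object.get(f"a{num}"):
--             break
--         rows.append([str(num)] + ["#"] * row_width(object, num))
--         num += 1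
--     return [header] + rows
--
-- def row_width(object, num):
--     width = 0
--     while object.get(f"{chr(97 + width)}{num}"):
--         width += 1
--     return width
-- ===== Notes on version B (the rewrite author's own statement) =====
-- stated objective: simpler
-- what changed: Replaces the mutated shared table, the recursive recur_hash with its table[num] indexing, and the try/except control flow by a plain while loop that builds each row directly as [str(num)] + ["#"]*width with a small run-length helper; Pre_ excludes the inputs where A raises (chr ValueError for size[0] >= 1114016, IndexError when a truthy row key follows a missing/falsy earlier row) or where a present-but-empty column value makes A return None instead of a list.
-- outside the precondition, e.g. on grid_to_hash_table({'a1': 'x', 'b1': ''}, (1, 1)): A returns None, B returns [['', 'a'], ['1', '#']]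
import Mathlib
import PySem

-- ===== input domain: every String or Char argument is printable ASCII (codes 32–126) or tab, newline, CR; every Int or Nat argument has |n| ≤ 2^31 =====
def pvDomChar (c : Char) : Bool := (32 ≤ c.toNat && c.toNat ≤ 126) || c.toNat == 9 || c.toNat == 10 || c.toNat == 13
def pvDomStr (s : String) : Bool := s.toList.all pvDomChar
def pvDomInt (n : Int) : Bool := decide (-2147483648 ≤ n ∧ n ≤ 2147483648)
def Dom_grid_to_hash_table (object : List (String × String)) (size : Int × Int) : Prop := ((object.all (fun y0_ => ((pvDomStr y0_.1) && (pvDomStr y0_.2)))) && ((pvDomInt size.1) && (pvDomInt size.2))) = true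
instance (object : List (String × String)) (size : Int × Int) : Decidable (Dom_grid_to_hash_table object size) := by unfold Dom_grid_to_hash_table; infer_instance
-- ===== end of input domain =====

-- B replaces A's shared-table mutation, recursion and try/except by a plain while loop building
-- each row as [str(num)] + ["#"]*width (objective: simpler; same cost).

-- ===== PORT A =====
-- chr(n): exact for 0 ≤ n < 0x110000 (every use here has 97 ≤ n small)
def pvChr (n : Int) : String := String.ofList [Char.ofNat n.toNat]
-- object[key] lookup of the Python dict built from the association list (dict semantics: later duplicate key wins)
def pvGet (object : List (String × String)) (k : String) : Option String := PySem.Dict.get? (PySem.Dict.ofList object) k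

-- recur_hash: `none` plays Python's fall-through `return None` (present-but-falsy value).
-- The fuel object.length+1 is a totalisation device only: inside Pre_ the scan provably stops
-- (at an absent key) after at most object.length successful lookups, so fuel is never exhausted.
def recur_hash (fuel : Nat) (table : List (List String)) (object : List (String × String)) (x y : Int) : Option (List (List String)) :=
  match fuel with
  | 0 => none
  | f + 1 =>
    match pvGet object (pvChr x ++ PySem.Int.toStr y) with
    | none => some table                -- except KeyError: return table_change
    | some v =>
      if v ≠ "" then                    -- if object[f"{chr(x)}{y}"]:
        recur_hash f (table.modify y.toNat (fun row => row ++ ["#"])) object (x + 1) y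
      else none                         -- falls off the function body: returns None

-- body of A's second for-loop (one iteration, the same code as the Python loop body)
def stepA (object : List (String × String)) (t : List (List String)) (num : Int) : List (List String) :=
  match pvGet object ("a" ++ PySem.Int.toStr num) with
  | none => t                           -- except KeyError: pass
  | some v =>
    if v ≠ "" then
      match recur_hash (object.length + 1) (t ++ [[PySem.Int.toStr num]]) object 97 num with
      | some t' => t'
      | none => t                       -- Python would set table = None; outside Pre_ only
    else t

def grid_to_hash_table (object : List (String × String)) (size : Int × Int) : List (List String) :=
  let table := [[""]]
  let table := (PySem.List.pyRange 97 (size.1 + 97) 1).foldl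
      (fun t num => t.modify 0 (fun row => row ++ [pvChr num])) table
  (PySem.List.pyRange 1 (size.2 + 1) 1).foldl (stepA object) table

-- ===== PORT B =====
-- row_width: B's inner while loop; fuel is a totalisation device as above (inside Pre_ the
-- loop stops after at most object.length iterations).
def row_width (fuel : Nat) (object : List (String × String)) (num : Int) (width : Nat) : Nat :=
  match fuel with
  | 0 => width
  | f + 1 =>
    match pvGet object (pvChr (97 + (width : Int)) ++ PySem.Int.toStr num) with
    | some v => if v ≠ "" then row_width f object num (width + 1) else width
    | none => width

-- B's outer while loop: collect the rows from `num` on, stopping at the first non-truthy a{num}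
def alt_rows (object : List (String × String)) (hi num : Int) : List (List String) :=
  if _h : num ≤ hi then
    match pvGet object ("a" ++ PySem.Int.toStr num) with
    | some v =>
      if v ≠ "" then
        (PySem.Int.toStr num :: List.replicate (row_width (object.length + 1) object num 0) "#")
          :: alt_rows object hi (num + 1)
      else []
    | none => []
  else []
termination_by (hi + 1 - num).toNat
decreasing_by omega

def grid_to_hash_table_alt (object : List (String × String)) (size : Int × Int) : List (List String) :=
  ([""] ++ (PySem.List.pyRange 97 (97 + size.1) 1).map pvChr) :: alt_rows object size.2 1

-- ===== PRECONDITION & SPEC =====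
def pvTruthy (object : List (String × String)) (k : String) : Bool :=
  match pvGet object k with
  | some v => v ≠ ""
  | none => false

-- syntactic helpers for Pre_: recognise a key of the form "a" ++ str(n) for some n ≥ 1
def pvIsDigit (c : Char) : Bool := 48 ≤ c.toNat && c.toNat ≤ 57

def pvParseRev : List Char → Nat
  | [] => 0
  | c :: cs => (c.toNat - 48) + 10 * pvParseRev cs

def pvParse (cs : List Char) : Nat := pvParseRev cs.reverse

def pvRowOfChars (cs : List Char) : Option Int :=
  if cs.head? = some 'a' ∧ cs.tail ≠ [] ∧ cs.tail.all pvIsDigit ∧ cs.tail.head? ≠ some '0'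
  then some ((pvParse cs.tail : Nat) : Int) else none

def pvRowOf (k : String) : Option Int := pvRowOfChars k.toList

-- Pre_ excludes exactly the inputs on which A does not return a list:
--  * size[0] ≥ 1114016, where the first loop's chr() raises ValueError;
--  * a truthy row key "a<n>" (1 ≤ n ≤ size[1]) with n beyond the number of rows the table can have
--    grown to, or with an earlier row key missing/falsy: recur_hash's table[n] raises IndexError;
--  * a scanned row whose consecutive-column run ends at a present-but-empty value instead of a
--    missing key: A's table becomes None, so A returns None (not a list) or raises AttributeError.
def Pre_grid_to_hash_table (object : List (String × String)) (size : Int × Int) : Prop :=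
  size.1 ≤ 1114015 ∧
  ∀ p ∈ object, ∀ n ∈ (pvRowOf p.1).toList,
    pvTruthy object p.1 = true → n ≤ size.2 →
      n ≤ (object.length : Int) + 1 ∧
      (∀ m ∈ PySem.List.pyRange 1 (min n ((object.length : Int) + 2)) 1,
        pvTruthy object ("a" ++ PySem.Int.toStr m) = true) ∧
      ∃ w ∈ List.range (object.length + 1),
        (∀ i ∈ List.range w, pvTruthy object (pvChr (97 + (i : Int)) ++ PySem.Int.toStr n) = true) ∧
        pvGet object (pvChr (97 + (w : Int)) ++ PySem.Int.toStr n) = none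

instance (object : List (String × String)) (size : Int × Int) : Decidable (Pre_grid_to_hash_table object size) := by
  unfold Pre_grid_to_hash_table; infer_instance

def pvWitness_grid_to_hash_table : (List (String × String)) × (Int × Int) :=
  ([("a1", "#"), ("b1", "#"), ("a2", "#")], (2, 2))

def Spec_grid_to_hash_table (object : List (String × String)) (size : Int × Int) (out : List (List String)) : Prop := out = grid_to_hash_table_alt object size
instance (object : List (String × String)) (size : Int × Int) (out : List (List String)) : Decidable (Spec_grid_to_hash_table object size out) := by unfold Spec_grid_to_hash_table; infer_instance

-- ===== CLAIM (what is proved, stated in full; the proofs are below) =====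
def Claim_equal_grid_to_hash_table : Prop := ∀ (object : List (String × String)) (size : Int × Int), Dom_grid_to_hash_table object size → Pre_grid_to_hash_table object size → Spec_grid_to_hash_table object size (grid_to_hash_table object size)

-- ===== LEMMAS AND PROOFS =====

theorem pv_witness_ok :
    Dom_grid_to_hash_table pvWitness_grid_to_hash_table.1 pvWitness_grid_to_hash_table.2 ∧
    Pre_grid_to_hash_table pvWitness_grid_to_hash_table.1 pvWitness_grid_to_hash_table.2 := by
  decide

theorem pvTruthy_true {object : List (String × String)} {k : String}
    (h : pvTruthy object k = true) : ∃ v, pvGet object k = some v ∧ v ≠ "" := by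
  unfold pvTruthy at h
  cases hg : pvGet object k with
  | none => rw [hg] at h; simp at h
  | some v => rw [hg] at h; simp at h; exact ⟨v, rfl, h⟩

-- ---- arithmetic of the key syntax: pvRowOf inverts "a" ++ str(n) for n ≥ 1 ----

theorem pv_digitChar_sub (d : Nat) (hd : d < 10) : (Nat.digitChar d).toNat - 48 = d := by
  interval_cases d <;> rfl

theorem pv_digitChar_isDigit (d : Nat) (hd : d < 10) : pvIsDigit (Nat.digitChar d) = true := by
  interval_cases d <;> rfl

theorem pv_digitChar_ne_zeroChar (d : Nat) (hd : d < 10) (h0 : d ≠ 0) : Nat.digitChar d ≠ '0' := by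
  interval_cases d <;> simp_all <;> decide

theorem pv_toDigitsCore_eq (f : Nat) :
    ∀ (n : Nat) (ds : List Char), 0 < n → n < f →
    Nat.toDigitsCore 10 f n ds = ((Nat.digits 10 n).map Nat.digitChar).reverse ++ ds := by
  induction f with
  | zero => intro n ds h1 h2; omega
  | succ f ih =>
    intro n ds h1 h2
    have hstep : Nat.toDigitsCore 10 (f + 1) n ds
        = if n / 10 = 0 then (n % 10).digitChar :: ds
          else Nat.toDigitsCore 10 f (n / 10) ((n % 10).digitChar :: ds) := rfl
    rw [hstep, Nat.digits_def' (by norm_num) h1]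
    by_cases h : n / 10 = 0
    · rw [if_pos h, h]
      simp
    · rw [if_neg h, ih (n / 10) _ (Nat.pos_of_ne_zero h) (by omega)]
      simp

theorem pvParseRev_map (l : List Nat) (hl : ∀ d ∈ l, d < 10) :
    pvParseRev (l.map Nat.digitChar) = Nat.ofDigits 10 l := by
  induction l with
  | nil => rfl
  | cons d l ih =>
    simp only [List.map_cons, pvParseRev, Nat.ofDigits_cons,
      pv_digitChar_sub d (hl d (by simp)), ih (fun x hx => hl x (by simp [hx]))]

theorem pvRowOf_key (n : Int) (hn : 1 ≤ n) :
    pvRowOf ("a" ++ PySem.Int.toStr n) = some n := by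
  have hm : 0 < n.toNat := by omega
  have htl : ("a" ++ PySem.Int.toStr n).toList
      = 'a' :: ((Nat.digits 10 n.toNat).map Nat.digitChar).reverse := by
    rw [String.toList_append, PySem.Int.toList_toStr]
    have : PySem.Int.toChars n = Nat.toDigits 10 n.toNat := by
      unfold PySem.Int.toChars
      rw [if_neg (by omega)]
    rw [this]
    unfold Nat.toDigits
    rw [pv_toDigitsCore_eq (n.toNat + 1) n.toNat [] hm (by omega)]
    simp
  have hne : Nat.digits 10 n.toNat ≠ [] := Nat.digits_ne_nil_iff_ne_zero.mpr (by omega)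
  have hlt : ∀ d ∈ Nat.digits 10 n.toNat, d < 10 :=
    fun d hd => Nat.digits_lt_base (by norm_num) hd
  unfold pvRowOf
  rw [htl]
  unfold pvRowOfChars
  simp only [List.head?_cons, List.tail_cons]
  rw [if_pos]
  · congr 1
    unfold pvParse
    rw [List.reverse_reverse, pvParseRev_map _ hlt, Nat.ofDigits_digits]
    omega
  · refine ⟨trivial, by simpa using hne, ?_, ?_⟩
    · rw [List.all_eq_true]
      intro c hc
      rw [List.mem_reverse, List.mem_map] at hc
      obtain ⟨d, hd, rfl⟩ := hc
      exact pv_digitChar_isDigit d (hlt d hd)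
    · rw [List.head?_reverse, List.getLast?_map,
        List.getLast?_eq_some_getLast hne]
      simp only [Option.map_some, ne_eq, Option.some.injEq]
      exact pv_digitChar_ne_zeroChar _ (hlt _ (List.getLast_mem hne))
        (Nat.getLast_digit_ne_zero 10 (by omega))

theorem pvGet_some_key {object : List (String × String)} {k v : String}
    (h : pvGet object k = some v) : ∃ p ∈ object, p.1 = k := by
  have hk : k ∈ (PySem.Dict.ofList object).keys := by
    by_contra hk
    rw [← PySem.Dict.get?_eq_none_iff_not_mem_keys] at hk
    unfold pvGet at h
    rw [hk] at h; cases h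
  have h2 : (PySem.Dict.ofList object).keys
      = PySem.Set.update PySem.Dict.empty.keys (object.map Prod.fst) :=
    PySem.Dict.keys_foldl_insert_key object Prod.fst (fun _ p => p.2) PySem.Dict.empty
  rw [h2, PySem.Dict.keys_empty] at hk
  rcases (PySem.Set.mem_update _ _ _).mp hk with h3 | h3
  · cases h3
  · obtain ⟨p, hp, rfl⟩ := List.mem_map.mp h3
    exact ⟨p, hp, rfl⟩

-- a truthy row key inside the row range yields the facts the loop proof needs
theorem pvRow_facts {object : List (String × String)} {hi : Int}
    (hpre : ∀ p ∈ object, ∀ n ∈ (pvRowOf p.1).toList,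
      pvTruthy object p.1 = true → n ≤ hi →
        n ≤ (object.length : Int) + 1 ∧
        (∀ m ∈ PySem.List.pyRange 1 (min n ((object.length : Int) + 2)) 1,
          pvTruthy object ("a" ++ PySem.Int.toStr m) = true) ∧
        ∃ w ∈ List.range (object.length + 1),
          (∀ i ∈ List.range w, pvTruthy object (pvChr (97 + (i : Int)) ++ PySem.Int.toStr n) = true) ∧
          pvGet object (pvChr (97 + (w : Int)) ++ PySem.Int.toStr n) = none)
    {n : Int} (h1 : 1 ≤ n) (h2 : n ≤ hi)
    (htr : pvTruthy object ("a" ++ PySem.Int.toStr n) = true) :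
    n ≤ (object.length : Int) + 1 ∧
    (∀ m : Int, 1 ≤ m → m < n → pvTruthy object ("a" ++ PySem.Int.toStr m) = true) ∧
    ∃ w ∈ List.range (object.length + 1),
      (∀ i ∈ List.range w, pvTruthy object (pvChr (97 + (i : Int)) ++ PySem.Int.toStr n) = true) ∧
      pvGet object (pvChr (97 + (w : Int)) ++ PySem.Int.toStr n) = none := by
  obtain ⟨v, hg, -⟩ := pvTruthy_true htr
  obtain ⟨p, hp, hpk⟩ := pvGet_some_key hg
  have hrow := hpre p hp n (by rw [hpk, pvRowOf_key n h1]; simp) (by rw [hpk]; exact htr) h2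
  obtain ⟨hnb, hpref, hrun⟩ := hrow
  refine ⟨hnb, ?_, hrun⟩
  intro m hm1 hm2
  exact hpref m (by rw [PySem.List.mem_pyRange_one]; omega)

-- the first loop keeps the table a singleton and appends letters to its only row
theorem headerFold (l : List Int) (r : List String) :
    l.foldl (fun t num => t.modify 0 (fun row => row ++ [pvChr num])) [r]
      = [r ++ l.map pvChr] := by
  induction l generalizing r with
  | nil => simp
  | cons a l ih => simpa [List.modify] using ih (r ++ [pvChr a])

theorem modify_append_last (t : List (List String)) (r : List String) (f : List String → List String) :
    (t ++ [r]).modify t.length f = t ++ [f r] := by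
  induction t with
  | nil => simp [List.modify]
  | cons a t ih => simp [List.modify] at ih ⊢; exact ih

theorem recur_hash_run (object : List (String × String)) (y : Int) (_hy : 1 ≤ y)
    (d : Nat) :
    ∀ (fuel j : Nat) (t : List (List String)) (r : List String),
    (∀ i, i < j + d → pvTruthy object (pvChr (97 + (i : Int)) ++ PySem.Int.toStr y) = true) →
    pvGet object (pvChr (97 + ((j + d : Nat) : Int)) ++ PySem.Int.toStr y) = none →
    t.length = y.toNat → d < fuel →
    recur_hash fuel (t ++ [r]) object (97 + (j : Int)) y
      = some (t ++ [r ++ List.replicate d "#"]) := by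
  induction d with
  | zero =>
    intro fuel j t r _hrun hend hlen hfuel
    obtain ⟨f, rfl⟩ : ∃ f, fuel = f + 1 := ⟨fuel - 1, by omega⟩
    simp only [Nat.add_zero] at hend
    simp [recur_hash, hend]
  | succ d ih =>
    intro fuel j t r hrun hend hlen hfuel
    obtain ⟨f, rfl⟩ : ∃ f, fuel = f + 1 := ⟨fuel - 1, by omega⟩
    obtain ⟨v, hg, hv⟩ := pvTruthy_true (hrun j (by omega))
    simp only [recur_hash, hg, if_pos hv, ne_eq]
    rw [← hlen, modify_append_last]
    rw [show (97 + (j : Int) + 1) = 97 + ((j + 1 : Nat) : Int) by push_cast; ring]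
    rw [ih f (j + 1) t (r ++ ["#"]) (fun i hi => hrun i (by omega))
      (by rw [show j + 1 + d = j + (d + 1) from by omega]; exact hend)
      hlen (by omega)]
    simp [List.replicate_succ]

theorem row_width_run (object : List (String × String)) (y : Int)
    (d : Nat) :
    ∀ (fuel j : Nat),
    (∀ i, i < j + d → pvTruthy object (pvChr (97 + (i : Int)) ++ PySem.Int.toStr y) = true) →
    pvGet object (pvChr (97 + ((j + d : Nat) : Int)) ++ PySem.Int.toStr y) = none →
    d < fuel →
    row_width fuel object y j = j + d := by
  induction d with
  | zero =>
    intro fuel j _hrun hend hfuel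
    obtain ⟨f, rfl⟩ : ∃ f, fuel = f + 1 := ⟨fuel - 1, by omega⟩
    simp only [Nat.add_zero] at hend
    simp [row_width, hend]
  | succ d ih =>
    intro fuel j hrun hend hfuel
    obtain ⟨f, rfl⟩ : ∃ f, fuel = f + 1 := ⟨fuel - 1, by omega⟩
    obtain ⟨v, hg, hv⟩ := pvTruthy_true (hrun j (by omega))
    simp only [row_width, hg, if_pos hv, ne_eq]
    rw [ih f (j + 1) (fun i hi => hrun i (by omega))
      (by rw [show j + 1 + d = j + (d + 1) from by omega]; exact hend)
      (by omega)]
    omega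

theorem stepA_noop (object : List (String × String)) (t : List (List String)) (num : Int)
    (h : pvTruthy object ("a" ++ PySem.Int.toStr num) = false) :
    stepA object t num = t := by
  unfold stepA pvTruthy at *
  cases hg : pvGet object ("a" ++ PySem.Int.toStr num) with
  | none => simp
  | some v => rw [hg] at h; simp at h; simp [h]

theorem fold_noop (object : List (String × String)) (hi : Int) :
    ∀ (k : Nat) (num : Int) (t : List (List String)),
    (hi + 1 - num).toNat = k →
    (∀ n : Int, num ≤ n → n < hi + 1 → pvTruthy object ("a" ++ PySem.Int.toStr n) = false) →
    (PySem.List.pyRange num (hi + 1) 1).foldl (stepA object) t = t := by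
  intro k
  induction k with
  | zero =>
    intro num t hk _hno
    rw [PySem.List.pyRange_one_eq_nil (by omega)]
    rfl
  | succ k ih =>
    intro num t hk hno
    rw [PySem.List.pyRange_one_cons (by omega), List.foldl_cons,
      stepA_noop object t num (hno num le_rfl (by omega))]
    exact ih (num + 1) t (by omega) (fun n h1 h2 => hno n (by omega) h2)

theorem fold_main (object : List (String × String)) (hi : Int)
    (hpre : ∀ p ∈ object, ∀ n ∈ (pvRowOf p.1).toList,
      pvTruthy object p.1 = true → n ≤ hi →
        n ≤ (object.length : Int) + 1 ∧
        (∀ m ∈ PySem.List.pyRange 1 (min n ((object.length : Int) + 2)) 1,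
          pvTruthy object ("a" ++ PySem.Int.toStr m) = true) ∧
        ∃ w ∈ List.range (object.length + 1),
          (∀ i ∈ List.range w, pvTruthy object (pvChr (97 + (i : Int)) ++ PySem.Int.toStr n) = true) ∧
          pvGet object (pvChr (97 + (w : Int)) ++ PySem.Int.toStr n) = none) :
    ∀ (k : Nat) (num : Int) (t : List (List String)),
    (hi + 1 - num).toNat = k → 1 ≤ num → t.length = num.toNat →
    (PySem.List.pyRange num (hi + 1) 1).foldl (stepA object) t = t ++ alt_rows object hi num := by
  intro k
  induction k with
  | zero =>
    intro num t hk _h1 _hlen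
    rw [PySem.List.pyRange_one_eq_nil (by omega), alt_rows]
    simp [show ¬(num ≤ hi) by omega]
  | succ k ih =>
    intro num t hk h1 hlen
    rw [PySem.List.pyRange_one_cons (by omega), List.foldl_cons]
    cases htr : pvTruthy object ("a" ++ PySem.Int.toStr num) with
    | false =>
      have hall : ∀ n : Int, num ≤ n → n < hi + 1 →
          pvTruthy object ("a" ++ PySem.Int.toStr n) = false := by
        intro n hn1 hn2
        cases hb : pvTruthy object ("a" ++ PySem.Int.toStr n) with
        | false => rfl
        | true =>
          exfalso
          obtain ⟨-, hprefix, -⟩ := pvRow_facts hpre (by omega) (by omega) hb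
          rcases eq_or_lt_of_le hn1 with rfl | hlt
          · rw [htr] at hb; exact Bool.false_ne_true hb
          · have := hprefix num (by omega) hlt
            rw [htr] at this; exact Bool.false_ne_true this
      rw [stepA_noop object t num htr,
        fold_noop object hi k (num + 1) t (by omega) (fun n hn1 hn2 => hall n (by omega) hn2)]
      rw [alt_rows]
      unfold pvTruthy at htr
      cases hg : pvGet object ("a" ++ PySem.Int.toStr num) with
      | none => simp [show num ≤ hi by omega]
      | some v =>
        rw [hg] at htr
        simp only [ne_eq, decide_eq_false_iff_not, not_not] at htr
        simp [show num ≤ hi by omega, htr]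
    | true =>
      obtain ⟨v, hg, hv⟩ := pvTruthy_true htr
      obtain ⟨-, -, w, hwmem, hruni, hwend⟩ := pvRow_facts hpre (by omega) (by omega) htr
      rw [List.mem_range] at hwmem
      have hrun : ∀ i, i < 0 + w →
          pvTruthy object (pvChr (97 + (i : Int)) ++ PySem.Int.toStr num) = true := by
        intro i hi2; exact hruni i (by rw [List.mem_range]; omega)
      have hrec := recur_hash_run object num (by omega) w (object.length + 1) 0 t
        [PySem.Int.toStr num] hrun (by simpa using hwend) hlen (by omega)
      have hwidth := row_width_run object num w (object.length + 1) 0 hrun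
        (by simpa using hwend) (by omega)
      simp only [Nat.cast_zero, add_zero, Nat.zero_add] at hrec hwidth
      have hstep : stepA object t num
          = t ++ [PySem.Int.toStr num :: List.replicate w "#"] := by
        unfold stepA
        rw [hg]
        simp only [if_pos hv, hrec]
        simp
      rw [hstep, alt_rows]
      simp only [show num ≤ hi by omega, dite_true, hg, if_pos hv, hwidth]
      rw [ih (num + 1) (t ++ [PySem.Int.toStr num :: List.replicate w "#"]) (by omega)
        (by omega) (by simp [hlen]; omega)]
      simp

-- ===== VERDICT (by name: the statement is the Claim_ definition above) =====
theorem grid_to_hash_table_spec : Claim_equal_grid_to_hash_table := by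
  intro object size _hd hpre
  unfold Spec_grid_to_hash_table
  obtain ⟨-, hrows⟩ := hpre
  show (PySem.List.pyRange 1 (size.2 + 1) 1).foldl (stepA object)
      ((PySem.List.pyRange 97 (size.1 + 97) 1).foldl
        (fun t num => t.modify 0 (fun row => row ++ [pvChr num])) [[""]])
    = grid_to_hash_table_alt object size
  unfold grid_to_hash_table_alt
  rw [headerFold]
  rw [fold_main object size.2 hrows (size.2 + 1 - 1).toNat 1 _ rfl le_rfl (by simp)]
  rw [show size.1 + 97 = 97 + size.1 by ring]
  simp
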